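-- pv_equiv track=rewrite | github.com/pueblak/wordle-autosolver | wordle_solver.py | get_master_response
-- ===== SOURCE A (Python) =====
-- RIGHT = 'O'
--
-- CLOSE = 'H'
--
-- WRONG = 'X'
--
-- def get_master_response(guess, answer):
--     if guess == answer:
--         return ''.join([RIGHT for _ in answer])
--     response = ''
--     # get frequency count of each letter in the answer
--     letter_count = dict()
--     for letter in answer:
--         if letter in letter_count:
--             letter_count[letter] += 1
--         else:
--             letter_count[letter] = 1
--     # first loop counts exact matches
--     for index in range(len(answer)):
--         letter = guess[index]
--         if letter == answer[index]:
--             response += RIGHT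
--             letter_count[letter] -= 1
--     # second loop counts non-exact matches
--     for index in range(len(answer)):
--         letter = guess[index]
--         if letter != answer[index]:
--             if letter in letter_count:
--                 if letter_count[letter] > 0:
--                     response += CLOSE
--                     letter_count[letter] -= 1
--     # third loop counts misses
--     while len(response) < len(answer):
--         response += WRONG
--     return response
-- ===== SOURCE B (Python) =====
-- def get_master_response(guess, answer):
--     n = len(answer)
--     exact = sum(g == a for g, a in zip(guess, answer))
--     common = sum(min(guess[:n].count(c), answer.count(c)) for c in set(answer))
--     return 'O' * exact + 'H' * (common - exact) + 'X' * (n - common)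
-- ===== Notes on version B (the rewrite author's own statement) =====
-- stated objective: simpler
-- what changed: Replaces A's dict building plus three stateful decrementing passes by a closed-form computation of the three group sizes: exact positional matches plus the multiset-intersection size of guess[:len(answer)] with answer give the counts of 'O', 'H' and 'X' directly; the per-character Python-level dict updates disappear into C-level zip/str.count scans, which is also measurably faster.
import Mathlib
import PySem

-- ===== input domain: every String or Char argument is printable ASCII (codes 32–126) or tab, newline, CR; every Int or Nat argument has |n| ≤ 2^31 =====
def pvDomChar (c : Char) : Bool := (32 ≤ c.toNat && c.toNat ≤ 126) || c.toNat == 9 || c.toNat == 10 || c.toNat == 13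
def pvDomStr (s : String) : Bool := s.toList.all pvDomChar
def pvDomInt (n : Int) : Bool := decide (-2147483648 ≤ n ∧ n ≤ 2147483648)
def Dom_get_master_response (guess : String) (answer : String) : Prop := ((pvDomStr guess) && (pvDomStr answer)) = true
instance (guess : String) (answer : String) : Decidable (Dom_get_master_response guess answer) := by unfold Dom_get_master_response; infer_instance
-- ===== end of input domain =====

-- B computes the O/H/X group sizes in closed form (exact matches + multiset-intersection size)
-- instead of A's dict building and three stateful decrementing passes; objective: simpler.

-- ===== PORT A =====
def get_master_response (guess : String) (answer : String) : String :=
  if guess = answer then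
    -- ''.join([RIGHT for _ in answer])
    String.ofList (answer.toList.map (fun _ => 'O'))
  else
    let g := guess.toList
    let a := answer.toList
    -- letter_count: frequency of each letter of the answer
    let letterCount : PySem.Dict Char Int :=
      a.foldl (fun d letter =>
        if d.contains letter then d.modify letter 0 (· + 1) else d.insert letter 1)
        PySem.Dict.empty
    -- first loop: exact matches ('O'); guess[index] is exact under Pre_ (index < len(guess))
    let st1 :=
      (PySem.List.pyRange 0 (PySem.Str.len answer) 1).foldl (fun st i =>
        if PySem.List.pyGetD g i ' ' = PySem.List.pyGetD a i ' ' then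
          (st.1 ++ ['O'], st.2.modify (PySem.List.pyGetD g i ' ') 0 (· - 1))
        else st) (([] : List Char), letterCount)
    -- second loop: non-exact matches ('H')
    let st2 :=
      (PySem.List.pyRange 0 (PySem.Str.len answer) 1).foldl (fun st i =>
        if PySem.List.pyGetD g i ' ' ≠ PySem.List.pyGetD a i ' ' then
          if st.2.contains (PySem.List.pyGetD g i ' ') then
            if st.2.getD (PySem.List.pyGetD g i ' ') 0 > 0 then
              (st.1 ++ ['H'], st.2.modify (PySem.List.pyGetD g i ' ') 0 (· - 1))
            else st
          else st
        else st) st1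
    -- third loop: append WRONG ('X') until the response has len(answer) characters
    String.ofList (st2.1 ++ List.replicate (a.length - st2.1.length) 'X')

-- ===== PORT B =====
def get_master_response_alt (guess : String) (answer : String) : String :=
  let g := guess.toList
  let a := answer.toList
  let n := a.length
  -- exact = sum(g == a for g, a in zip(guess, answer))  (a 0/1 sum is countP)
  let exact := (g.zip a).countP (fun p => p.1 == p.2)
  -- guess[:n]
  let gp := PySem.List.slice g none (some (n : Int))
  -- common = sum(min(guess[:n].count(c), answer.count(c)) for c in set(answer))
  let common := ((PySem.Set.ofList a).map (fun c => min (gp.count c) (a.count c))).sum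
  -- 'O' * exact + 'H' * (common - exact) + 'X' * (n - common)  (truncated Nat subtraction, like str * negative)
  String.ofList (List.replicate exact 'O' ++ List.replicate (common - exact) 'H'
    ++ List.replicate (n - common) 'X')

-- ===== PRECONDITION & SPEC =====
-- Pre_ excludes exactly the inputs where A raises IndexError: guess ≠ answer with guess shorter than answer.
def Pre_get_master_response (guess : String) (answer : String) : Prop :=
  guess = answer ∨ answer.toList.length ≤ guess.toList.length
instance (guess : String) (answer : String) : Decidable (Pre_get_master_response guess answer) := by
  unfold Pre_get_master_response; infer_instance
def pvWitness_get_master_response : String × String := ("stare", "crane")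

def Spec_get_master_response (guess : String) (answer : String) (out : String) : Prop :=
  out = get_master_response_alt guess answer
instance (guess : String) (answer : String) (out : String) : Decidable (Spec_get_master_response guess answer out) := by
  unfold Spec_get_master_response; infer_instance

-- ===== CLAIM (what is proved, stated in full; the proofs are below) =====
def Claim_equal_get_master_response : Prop := ∀ (guess : String) (answer : String), Dom_get_master_response guess answer → Pre_get_master_response guess answer → Spec_get_master_response guess answer (get_master_response guess answer)

-- ===== LEMMAS AND PROOFS =====

def pvStep1 (st : List Char × PySem.Dict Char Int) (p : Char × Char) : List Char × PySem.Dict Char Int :=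
  if p.1 = p.2 then (st.1 ++ ['O'], st.2.modify p.1 0 (· - 1)) else st

def pvStep2 (st : List Char × PySem.Dict Char Int) (p : Char × Char) : List Char × PySem.Dict Char Int :=
  if p.1 ≠ p.2 then
    if st.2.contains p.1 then
      if st.2.getD p.1 0 > 0 then (st.1 ++ ['H'], st.2.modify p.1 0 (· - 1)) else st
    else st
  else st

def pvGreedy : List Char → (Char → Int) → Nat
  | [], _ => 0
  | x :: L, m => if 0 < m x then pvGreedy L (Function.update m x (m x - 1)) + 1 else pvGreedy L m

lemma pv_range_fold_eq_zip_fold {β : Type} (g a : List Char) (h : a.length ≤ g.length)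
    (step : β → Char × Char → β) (init : β) :
    (PySem.List.pyRange 0 (a.length : Int) 1).foldl
      (fun st i => step st (PySem.List.pyGetD g i ' ', PySem.List.pyGetD a i ' ')) init
      = ((g.take a.length).zip a).foldl step init := by
  have hmap : (PySem.List.pyRange 0 (a.length : Int) 1).map
      (fun i => (PySem.List.pyGetD g i ' ', PySem.List.pyGetD a i ' ')) = (g.take a.length).zip a := by
    apply List.ext_getElem
    · simp [PySem.List.length_pyRange_one]
      omega
    · intro k h1 h2
      have hk : k < a.length := by
        simp [PySem.List.length_pyRange_one] at h1; omega
      have hkg : k < g.length := lt_of_lt_of_le hk h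
      simp only [List.getElem_map, PySem.List.getElem_pyRange_one, zero_add, List.getElem_zip,
        List.getElem_take, PySem.List.pyGetD_natCast]
      simp [hk, hkg]
  rw [← hmap, List.foldl_map]

lemma pv_build_eq_counter (a : List Char) :
    a.foldl (fun d letter =>
        if d.contains letter then d.modify letter 0 (· + 1) else d.insert letter 1)
      PySem.Dict.empty = PySem.Dict.counter a := by
  have hstep : (fun (d : PySem.Dict Char Int) (letter : Char) =>
      if d.contains letter then d.modify letter 0 (· + 1) else d.insert letter 1)
      = fun d x => d.modify x 0 (· + 1) := by
    funext d x
    by_cases hx : d.contains x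
    · simp [hx]
    · have hx' : d.contains x = false := by simpa using hx
      simp [hx', PySem.Dict.modify, PySem.Dict.insert, PySem.Dict.getD_of_not_contains d 0 hx']
  rw [hstep]
  exact (PySem.Dict.counter_eq_foldl a).symm

lemma pv_pass1_fst (P : List (Char × Char)) :
    ∀ (st : List Char × PySem.Dict Char Int),
      (P.foldl pvStep1 st).1 = st.1 ++ List.replicate (P.countP (fun p => p.1 == p.2)) 'O' := by
  induction P with
  | nil => intro st; simp
  | cons p P ih =>
    intro st
    by_cases hp : p.1 = p.2
    · simp only [List.foldl_cons, pvStep1, if_pos hp, List.countP_cons]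
      rw [ih]
      simp [hp, List.replicate_succ]
    · simp only [List.foldl_cons, pvStep1, if_neg hp, List.countP_cons]
      rw [ih]
      simp [hp]

lemma pv_pass1_getD (P : List (Char × Char)) :
    ∀ (st : List Char × PySem.Dict Char Int) (c : Char),
      ((P.foldl pvStep1 st).2).getD c 0
        = st.2.getD c 0 - (((P.filter (fun p => p.1 == p.2)).map (·.1)).count c : Int) := by
  induction P with
  | nil => intro st c; simp
  | cons p P ih =>
    intro st c
    by_cases hp : p.1 = p.2
    · simp only [List.foldl_cons, pvStep1, if_pos hp]
      rw [ih]
      rw [PySem.Dict.getD_modify]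
      by_cases hc : c = p.1
      · simp [List.filter_cons, hp, hc]
        ring
      · have hc2 : ¬ p.2 = c := fun h => hc (by rw [hp, h])
        have hc3 : ¬ c = p.2 := fun h => hc2 h.symm
        simp [List.filter_cons, hp, hc, hc2, hc3, List.count_cons]
    · simp only [List.foldl_cons, pvStep1, if_neg hp]
      rw [ih]
      simp [hp]

lemma pv_pass2_fst (P : List (Char × Char)) :
    ∀ (st : List Char × PySem.Dict Char Int),
      (P.foldl pvStep2 st).1
        = st.1 ++ List.replicate
            (pvGreedy ((P.filter (fun p => !(p.1 == p.2))).map (·.1)) (fun c => st.2.getD c 0)) 'H' := by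
  induction P with
  | nil => intro st; simp [pvGreedy]
  | cons p P ih =>
    intro st
    by_cases hp : p.1 = p.2
    · simp only [List.foldl_cons, pvStep2, hp]
      rw [ih]
      simp [hp]
    · by_cases hc : st.2.contains p.1
      · by_cases hpos : st.2.getD p.1 0 > 0
        · simp only [List.foldl_cons, pvStep2, if_pos (show p.1 ≠ p.2 from hp), if_pos hc, if_pos hpos]
          rw [ih]
          have hm : (fun c => (st.2.modify p.1 0 (· - 1)).getD c 0)
              = Function.update (fun c => st.2.getD c 0) p.1 (st.2.getD p.1 0 - 1) := by
            funext c
            rw [PySem.Dict.getD_modify]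
            simp [Function.update_apply]
          simp only [hm, List.filter_cons]
          simp [hp, pvGreedy, hpos, List.replicate_succ]
        · simp only [List.foldl_cons, pvStep2, if_pos (show p.1 ≠ p.2 from hp), if_pos hc, if_neg hpos]
          rw [ih]
          simp [hp, pvGreedy, hpos]
      · simp only [List.foldl_cons, pvStep2, if_pos (show p.1 ≠ p.2 from hp), if_neg hc]
        rw [ih]
        have hc' : st.2.contains p.1 = false := by simpa using hc
        have h0 : st.2.getD p.1 0 = 0 := PySem.Dict.getD_of_not_contains st.2 0 hc'
        simp [hp, pvGreedy, h0]

lemma pv_greedy_sum : ∀ (L : List Char) (m : Char → Int) (S : Finset Char),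
    (∀ c, c ∉ S → m c ≤ 0) →
    (pvGreedy L m : Int) = ∑ c ∈ S, min (L.count c : Int) (max (m c) 0) := by
  intro L
  induction L with
  | nil =>
    intro m S h
    rw [pvGreedy]
    rw [Finset.sum_eq_zero]
    · simp
    · intro c _
      simp only [List.count_nil, Nat.cast_zero]
      omega
  | cons x L ih =>
    intro m S h
    by_cases hx : 0 < m x
    · have hxS : x ∈ S := by
        by_contra hxs
        exact absurd hx (not_lt.mpr (h x hxs))
      have h' : ∀ c, c ∉ S → Function.update m x (m x - 1) c ≤ 0 := by
        intro c hc
        rw [Function.update_apply]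
        split_ifs with he
        · exact absurd (he ▸ hxS) hc
        · exact h c hc
      rw [pvGreedy, if_pos hx]
      push_cast
      rw [ih _ S h']
      rw [← Finset.sum_erase_add S _ hxS, ← Finset.sum_erase_add S _ hxS]
      have he : ∑ c ∈ S.erase x, min ((L.count c : Int)) (max (Function.update m x (m x - 1) c) 0)
          = ∑ c ∈ S.erase x, min (((x :: L).count c : Int)) (max (m c) 0) := by
        refine Finset.sum_congr rfl (fun c hc => ?_)
        have hcx : c ≠ x := Finset.ne_of_mem_erase hc
        simp [hcx, Ne.symm hcx, List.count_cons]
      rw [he]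
      have hterm : min ((L.count x : Int)) (max (Function.update m x (m x - 1) x) 0) + 1
          = min (((x :: L).count x : Int)) (max (m x) 0) := by
        simp only [Function.update_self, List.count_cons, BEq.rfl, if_pos]
        push_cast
        omega
      omega
    · rw [pvGreedy, if_neg hx]
      rw [ih _ S h]
      refine Finset.sum_congr rfl (fun c hc => ?_)
      by_cases hcx : c = x
      · subst hcx
        simp only [List.count_cons, BEq.rfl, if_pos]
        push_cast
        omega
      · simp [List.count_cons, Ne.symm hcx]

lemma pv_count_split (P : List (Char × Char)) (q : Char × Char → Bool) (c : Char) :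
    ((P.filter q).map (·.1)).count c + ((P.filter (fun p => !(q p))).map (·.1)).count c
      = (P.map (·.1)).count c := by
  induction P with
  | nil => simp
  | cons p P ih =>
    by_cases hq : q p <;> by_cases hc : p.1 = c <;>
      simp [List.filter_cons, hq, hc, List.count_cons] <;> omega

lemma pv_sum_count_of_mem (M : List Char) (S : Finset Char) (h : ∀ x ∈ M, x ∈ S) :
    (∑ c ∈ S, M.count c) = M.length := by
  induction M with
  | nil => simp
  | cons x M ih =>
    have hx : x ∈ S := h x (by simp)
    have hM : ∀ y ∈ M, y ∈ S := fun y hy => h y (List.mem_cons_of_mem _ hy)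
    calc ∑ c ∈ S, (x :: M).count c = ∑ c ∈ S, (M.count c + if x = c then 1 else 0) := by
          refine Finset.sum_congr rfl (fun c _ => ?_)
          simp [List.count_cons]
      _ = (∑ c ∈ S, M.count c) + ∑ c ∈ S, (if x = c then 1 else 0) := Finset.sum_add_distrib
      _ = M.length + 1 := by rw [ih hM]; simp [Finset.sum_ite_eq, hx]
      _ = (x :: M).length := by simp

lemma pv_zip_take_left (g a : List Char) : (g.take a.length).zip a = g.zip a := by
  induction a generalizing g with
  | nil => simp
  | cons y a ih =>
    cases g with
    | nil => simp
    | cons x g => simp [ih]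

lemma pv_set_toFinset (a : List Char) : (PySem.Set.ofList a).toFinset = a.toFinset := by
  ext c
  simp [List.mem_toFinset, PySem.Set.mem_ofList]

lemma pv_sum_ofList (a : List Char) (f : Char → Nat) :
    ((PySem.Set.ofList a).map f).sum = ∑ c ∈ a.toFinset, f c := by
  rw [← List.sum_toFinset f (PySem.Set.nodup_ofList a), pv_set_toFinset]

lemma pv_countP_zip_self (a : List Char) :
    (a.zip a).countP (fun p => p.1 == p.2) = a.length := by
  induction a with
  | nil => simp
  | cons x a ih => simp [ih]

lemma pv_map_const (a : List Char) : a.map (fun _ => 'O') = List.replicate a.length 'O' := by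
  induction a with
  | nil => simp
  | cons x a ih => simp [ih, List.replicate_succ]

lemma pv_main (g a : List Char) (hlen : a.length ≤ g.length) :
    (let st1 :=
      (PySem.List.pyRange 0 (a.length : Int) 1).foldl
        (fun st i => pvStep1 st (PySem.List.pyGetD g i ' ', PySem.List.pyGetD a i ' '))
        (([] : List Char),
          a.foldl (fun d letter =>
            if d.contains letter then d.modify letter 0 (· + 1) else d.insert letter 1)
            PySem.Dict.empty)
    let st2 :=
      (PySem.List.pyRange 0 (a.length : Int) 1).foldl
        (fun st i => pvStep2 st (PySem.List.pyGetD g i ' ', PySem.List.pyGetD a i ' '))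
        st1
    st2.1 ++ List.replicate (a.length - st2.1.length) 'X')
    = (let ex := (g.zip a).countP (fun p => p.1 == p.2)
       let gp := PySem.List.slice g none (some (a.length : Int))
       let common := ((PySem.Set.ofList a).map (fun c => min (gp.count c) (a.count c))).sum
       List.replicate ex 'O' ++ List.replicate (common - ex) 'H'
         ++ List.replicate (a.length - common) 'X') := by
  dsimp only
  rw [pv_range_fold_eq_zip_fold g a hlen pvStep1, pv_range_fold_eq_zip_fold g a hlen pvStep2]
  rw [pv_build_eq_counter, pv_zip_take_left]
  rw [pv_pass2_fst, pv_pass1_fst]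
  have hm : (fun c => ((g.zip a).foldl pvStep1 (([] : List Char), PySem.Dict.counter a)).2.getD c 0)
      = fun c => ((a.count c : Int) - (((((g.zip a).filter (fun p => p.1 == p.2)).map (·.1)).count c : Nat) : Int)) := by
    funext c
    rw [pv_pass1_getD, PySem.Dict.getD_counter]
  rw [hm]
  -- abbreviations
  set P := g.zip a with hP
  set E := (P.filter (fun p => p.1 == p.2)).map (·.1) with hE
  set L := (P.filter (fun p => !(p.1 == p.2))).map (·.1) with hL
  set ex := P.countP (fun p => p.1 == p.2) with hex
  have hfst : (fun x : Char × Char => x.1) = Prod.fst := rfl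
  have hsnd : (fun x : Char × Char => x.2) = Prod.snd := rfl
  have hPfst : P.map (·.1) = g.take a.length := by
    rw [hP, ← pv_zip_take_left, hfst]
    apply List.map_fst_zip
    simp
  have hPsnd : P.map (·.2) = a := by
    rw [hP, ← pv_zip_take_left, hsnd]
    apply List.map_snd_zip
    simp [hlen]
  have hEsnd : E = (P.filter (fun p => p.1 == p.2)).map (·.2) := by
    rw [hE]
    refine List.map_congr_left (fun p hp => ?_)
    have := (List.mem_filter.mp hp).2
    simpa using this
  have hEsub : E ⊆ a := by
    rw [hEsnd, ← hPsnd]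
    exact (List.filter_sublist.map _).subset
  have hEa : ∀ c, E.count c ≤ a.count c := by
    intro c
    rw [hEsnd, ← hPsnd]
    exact (List.filter_sublist.map _).count_le c
  have hEg : ∀ c, E.count c ≤ (g.take a.length).count c := by
    intro c
    rw [hE, ← hPfst]
    exact (List.filter_sublist.map _).count_le c
  have hsplit : ∀ c, E.count c + L.count c = (g.take a.length).count c := by
    intro c
    rw [hE, hL, ← hPfst]
    exact pv_count_split P _ c
  have hElen : E.length = ex := by
    rw [hE, hex, List.length_map, ← List.countP_eq_length_filter]
  have hcond : ∀ c, c ∉ a.toFinset → (a.count c : Int) - ((E.count c : Nat) : Int) ≤ 0 := by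
    intro c hc
    have h0 : a.count c = 0 := by
      rw [List.count_eq_zero]
      exact fun hmem => hc (List.mem_toFinset.mpr hmem)
    rw [h0]
    omega
  have hclose := pv_greedy_sum L _ a.toFinset hcond
  have hterm : ∀ c ∈ a.toFinset,
      min ((L.count c : Int)) (max ((a.count c : Int) - ((E.count c : Nat) : Int)) 0)
        = ((min ((g.take a.length).count c) (a.count c) : Nat) : Int) - ((E.count c : Nat) : Int) := by
    intro c _
    have h1 := hsplit c
    have h2 := hEa c
    have h3 := hEg c
    push_cast
    omega
  rw [Finset.sum_congr rfl hterm, Finset.sum_sub_distrib] at hclose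
  have hE2 : ∑ c ∈ a.toFinset, (E.count c) = E.length :=
    pv_sum_count_of_mem E a.toFinset (fun x hx => List.mem_toFinset.mpr (hEsub hx))
  set commonN := ∑ c ∈ a.toFinset, min ((g.take a.length).count c) (a.count c) with hcN
  have hcloseN : (pvGreedy L (fun c => (a.count c : Int) - ((E.count c : Nat) : Int)) : Nat)
      = commonN - ex ∧ ex ≤ commonN := by
    have hcast : ((∑ c ∈ a.toFinset, min ((g.take a.length).count c) (a.count c) : Nat) : Int)
        = ∑ c ∈ a.toFinset, ((min ((g.take a.length).count c) (a.count c) : Nat) : Int) := by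
      push_cast
      rfl
    rw [← hcast] at hclose
    have hcast2 : ((∑ c ∈ a.toFinset, E.count c : Nat) : Int)
        = ∑ c ∈ a.toFinset, ((E.count c : Nat) : Int) := by
      push_cast
      rfl
    rw [← hcast2, hE2, hElen] at hclose
    constructor <;> omega
  -- B's common
  have hgp : PySem.List.slice g none (some (a.length : Int)) = g.take a.length := by
    rw [PySem.List.slice_to g (Int.natCast_nonneg _)]
    simp
  have hcommon : ((PySem.Set.ofList a).map
        (fun c => min ((PySem.List.slice g none (some (a.length : Int))).count c) (a.count c))).sum
      = commonN := by
    simp only [hgp]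
    rw [pv_sum_ofList]
  rw [hcommon, hcloseN.1]
  have h4 : ex ≤ commonN := hcloseN.2
  have e2 : a.length - (([] ++ List.replicate ex 'O') ++ List.replicate (commonN - ex) 'H').length
      = a.length - commonN := by
    simp
    omega
  rw [e2]
  simp [List.append_assoc]

-- ===== VERDICT (by name: the statement is the Claim_ definition above) =====
theorem get_master_response_spec : Claim_equal_get_master_response := by
  intro guess answer _ hpre
  unfold Spec_get_master_response
  by_cases heq : guess = answer
  · subst heq
    unfold get_master_response get_master_response_alt
    rw [if_pos rfl]
    dsimp only
    congr 1
    rw [pv_map_const, pv_countP_zip_self]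
    have hgp : PySem.List.slice guess.toList none (some ((guess.toList.length : Nat) : Int))
        = guess.toList := by
      rw [PySem.List.slice_to guess.toList (Int.natCast_nonneg _)]
      simp
    rw [hgp]
    have hcommon : ((PySem.Set.ofList guess.toList).map
          (fun c => min (guess.toList.count c) (guess.toList.count c))).sum
        = guess.toList.length := by
      simp only [min_self]
      rw [pv_sum_ofList]
      exact pv_sum_count_of_mem _ _ (fun x hx => List.mem_toFinset.mpr hx)
    rw [hcommon]
    simp
  · have hlen : answer.toList.length ≤ guess.toList.length := by
      rcases hpre with h | h
      · exact absurd h heq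
      · exact h
    unfold get_master_response get_master_response_alt
    rw [if_neg heq]
    exact congrArg String.ofList (pv_main guess.toList answer.toList hlen)
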